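-- pv_equiv track=rewrite | github.com/cmatKhan/genomics | assignment4/gene_expression.py | translate_dictionary
-- ===== SOURCE A (Python) =====
-- def translate_dictionary(dictionary, list_of_samples):
--     # Initialize a new dictionary called translated_dictionary with empty curly brackets
--     translated_dictionary = {}
--     # Sort the keys of the input dictionary and save it in a list called 'genes'
--     genes = sorted(dictionary.keys())
--     # Use a for loop to iterate over each sample (using a numbered index, not sample names)
--     for i in range(len(list_of_samples)):
--         # Get the current sample name from list_of_samples
--         sample_name = list_of_samples[i]
--         # Initialize a new key in translated_dictionary using the current sample name. Let the value be an empty list.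
--         translated_dictionary.setdefault(sample_name, [])
--         # Use a for loop to iterate over each gene in your list of genes
--         for gene_name in genes:
--             # Find the RNA-seq count associated with this gene for this sample
--             gene_count = dictionary[gene_name][i]
--             # Append the count to the list of counts for this sample in translated_dictionary
--             translated_dictionary.setdefault(sample_name, []).append(gene_count) # it is not necessary to setdefault twice -- this line is sufficient for both line 83 and 77
--
--     # Return translated_dictionary
--     return translated_dictionary
-- ===== SOURCE B (Python) =====
-- def translate_dictionary(dictionary, list_of_samples):
--     # Table-then-transpose: build the gene-major matrix once, transpose it with
--     # zip, then hand each sample its ready-made column (extending, so duplicate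
--     # sample names accumulate just as repeated appends would).
--     genes = sorted(dictionary)
--     rows = [dictionary[g] for g in genes]
--     cols = list(zip(*rows))
--     translated = {}
--     for i, name in enumerate(list_of_samples):
--         translated.setdefault(name, [])
--         if genes:
--             translated[name].extend(cols[i])
--     return translated
-- ===== Notes on version B (the rewrite author's own statement) =====
-- stated objective: idiomatic
-- what changed: Replaces the index-driven nested loops (one dict lookup and one list.append per gene per sample) by building the sorted gene-major matrix once, transposing it with zip(*rows), and extending each sample's list with its whole precomputed column; Pre_ excludes only inputs where a gene's count list is shorter than list_of_samples, on which A raises IndexError.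
import Mathlib
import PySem

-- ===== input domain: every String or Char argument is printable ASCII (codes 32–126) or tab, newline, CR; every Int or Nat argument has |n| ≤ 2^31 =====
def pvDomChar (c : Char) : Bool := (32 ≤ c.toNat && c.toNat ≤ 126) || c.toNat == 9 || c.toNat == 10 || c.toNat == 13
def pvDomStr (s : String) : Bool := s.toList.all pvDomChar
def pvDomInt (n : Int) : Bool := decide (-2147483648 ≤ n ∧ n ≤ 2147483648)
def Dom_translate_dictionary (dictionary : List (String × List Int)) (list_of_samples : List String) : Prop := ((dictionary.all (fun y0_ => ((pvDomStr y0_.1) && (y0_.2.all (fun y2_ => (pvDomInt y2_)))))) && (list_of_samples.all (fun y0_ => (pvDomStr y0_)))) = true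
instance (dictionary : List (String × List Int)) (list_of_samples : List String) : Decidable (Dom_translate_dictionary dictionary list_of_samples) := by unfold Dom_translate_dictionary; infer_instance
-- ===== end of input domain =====

-- B replaces A's index-driven nested append loops by a sorted gene-major table
-- transposed once (zip(*rows)), each sample's list extended with its ready column
-- (idiomatic decomposition; same asymptotic cost, return value proved identical on Pre_).


-- ===== PORT A =====
-- for i in range(len(list_of_samples)): setdefault, then append dictionary[gene][i] gene by gene
def translate_dictionary (dictionary : List (String × List Int)) (list_of_samples : List String) : List (String × List Int) :=
  let d := PySem.Dict.ofList dictionary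
  let genes := PySem.List.sorted d.keys (fun g => g) false
  let translated := (PySem.List.pyRange 0 (list_of_samples.length : Int) 1).foldl
    (fun td i =>
      let sample_name := PySem.List.pyGetD list_of_samples i ""
      let td := td.setdefault sample_name []
      genes.foldl
        (fun td gene_name =>
          -- translated_dictionary.setdefault(sample_name, []).append(gene_count):
          -- sample_name is already present, so this appends to its list
          td.modify sample_name [] (fun cs => cs ++ [PySem.List.pyGetD (d.getD gene_name []) i 0]))
        td)
    PySem.Dict.empty
  translated.items

-- ===== PORT B =====
-- hand port of list(zip(*rows)) for rows : List (List Int): column k holds the k-th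
-- element of every row, truncated at the shortest row (zip() of no rows is []) — exact
def pvZipStar (rows : List (List Int)) : List (List Int) :=
  (List.range ((rows.map List.length).min?.getD 0)).map (fun k => rows.map (fun r => r.getD k 0))

def translate_dictionary_alt (dictionary : List (String × List Int)) (list_of_samples : List String) : List (String × List Int) :=
  let d := PySem.Dict.ofList dictionary
  let genes := PySem.List.sorted d.keys (fun g => g) false
  let rows := genes.map (fun g => d.getD g [])
  let cols := pvZipStar rows
  let translated := (PySem.List.enumerate list_of_samples).foldl
    (fun td p =>
      let td := td.setdefault p.2 []
      if genes.isEmpty then td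
      else td.modify p.2 [] (fun cs => cs ++ PySem.List.pyGetD cols p.1 []))
    PySem.Dict.empty
  translated.items

-- ===== PRECONDITION & SPEC =====
-- A raises IndexError at dictionary[gene_name][i] as soon as some gene's count list is
-- shorter than list_of_samples; Pre_ excludes exactly those inputs (B raises there too).
def Pre_translate_dictionary (dictionary : List (String × List Int)) (list_of_samples : List String) : Prop :=
  ∀ p ∈ (PySem.Dict.ofList dictionary).items, list_of_samples.length ≤ p.2.length
instance (dictionary : List (String × List Int)) (list_of_samples : List String) : Decidable (Pre_translate_dictionary dictionary list_of_samples) := by unfold Pre_translate_dictionary; infer_instance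

def pvWitness_translate_dictionary : (List (String × List Int)) × List String :=
  ([("g1", [1, 2]), ("g2", [3, 4])], ["s1", "s2"])

def Spec_translate_dictionary (dictionary : List (String × List Int)) (list_of_samples : List String) (out : List (String × List Int)) : Prop := out = translate_dictionary_alt dictionary list_of_samples
instance (dictionary : List (String × List Int)) (list_of_samples : List String) (out : List (String × List Int)) : Decidable (Spec_translate_dictionary dictionary list_of_samples out) := by unfold Spec_translate_dictionary; infer_instance

-- ===== CLAIM (what is proved, stated in full; the proofs are below) =====
def Claim_equal_translate_dictionary : Prop := ∀ (dictionary : List (String × List Int)) (list_of_samples : List String), Dom_translate_dictionary dictionary list_of_samples → Pre_translate_dictionary dictionary list_of_samples → Spec_translate_dictionary dictionary list_of_samples (translate_dictionary dictionary list_of_samples)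

-- ===== LEMMAS AND PROOFS =====

-- appending gene counts one by one after an insert is one insert of the whole batch
theorem pv_foldl_modify_app (l : List String) (f : String → Int) (s : String)
    (d : PySem.Dict String (List Int)) (v : List Int) :
    l.foldl (fun td g => td.modify s [] (fun cs => cs ++ [f g])) (d.insert s v)
      = d.insert s (v ++ l.map f) := by
  induction l generalizing v with
  | nil => simp
  | cons g gs ih =>
      rw [List.foldl_cons]
      have hstep : (d.insert s v).modify s [] (fun cs => cs ++ [f g]) = d.insert s (v ++ [f g]) := by
        simp [PySem.Dict.modify, PySem.Dict.getD_insert_self, PySem.Dict.insert_insert_self]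
      rw [hstep, ih]
      simp

-- xs[j+1] on a cons, for 0 ≤ j
theorem pv_pyGetD_cons_succ {α : Type} (x : α) (xs : List α) (j : Int) (d : α) (hj : 0 ≤ j) :
    PySem.List.pyGetD (x :: xs) (j + 1) d = PySem.List.pyGetD xs j d := by
  simp only [PySem.List.pyGetD, PySem.List.pyGet?, PySem.List.pyIdx?, List.length_cons]
  by_cases h : j < (xs.length : Int)
  · have ht : (j + 1).toNat = j.toNat + 1 := by omega
    simp [hj, h, show (0:Int) ≤ j + 1 by omega, ht]
  · simp [hj, h, show (0:Int) ≤ j + 1 by omega]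

-- an index loop 'for i in range(a, a+len(xs)): … i, xs[i-a] …' is a loop over enumerate(xs, a)
theorem pv_foldl_pyRange_eq_enumerate {α β : Type} (xs : List α) (dflt : α)
    (g : β → Int → α → β) (a : Int) (init : β) :
    (PySem.List.pyRange a (a + (xs.length : Int)) 1).foldl
        (fun acc i => g acc i (PySem.List.pyGetD xs (i - a) dflt)) init
      = (PySem.List.enumerate xs a).foldl (fun acc p => g acc p.1 p.2) init := by
  induction xs generalizing a init with
  | nil =>
      rw [show a + ((([] : List α).length : Nat) : Int) = a by simp]
      rw [PySem.List.pyRange_one_eq_nil le_rfl]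
      rfl
  | cons x t ih =>
      rw [PySem.List.pyRange_one_cons (by simp), PySem.List.enumerate_cons]
      simp only [List.foldl_cons, sub_self, PySem.List.pyGetD_zero_cons]
      have hcongr :
          (PySem.List.pyRange (a + 1) (a + ((x :: t).length : Int)) 1).foldl
              (fun acc i => g acc i (PySem.List.pyGetD (x :: t) (i - a) dflt))
              (g init a x)
            = (PySem.List.pyRange (a + 1) ((a + 1) + (t.length : Int)) 1).foldl
              (fun acc i => g acc i (PySem.List.pyGetD t (i - (a + 1)) dflt))
              (g init a x) := by
        have harg : a + ((x :: t).length : Int) = (a + 1) + (t.length : Int) := by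
          simp; omega
        rw [harg]
        refine PySem.List.foldl_congr_mem _ _ _ _ ?_
        intro acc i hi
        have hmem := (PySem.List.mem_pyRange_one).1 hi
        have : i - a = (i - (a + 1)) + 1 := by omega
        rw [this, pv_pyGetD_cons_succ x t _ dflt (by omega)]
      rw [hcongr, ih]

-- the column k of the transposed table is the k-th count of every row
theorem pv_zipStar_col (rows : List (List Int)) (k : Nat)
    (hk : k < (rows.map List.length).min?.getD 0) :
    PySem.List.pyGetD (pvZipStar rows) (k : Int) [] = rows.map (fun r => r.getD k 0) := by
  simp only [pvZipStar, PySem.List.pyGetD_natCast]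
  rw [List.getD_eq_getElem _ _ (by simpa using hk)]
  simp

-- a non-empty run of per-gene appends is one extension by the whole column
theorem pv_genes_step (genes : List String) (f : String → Int)
    (td1 : PySem.Dict String (List Int)) (s : String) (hg : genes ≠ []) :
    genes.foldl (fun td g => td.modify s [] (fun cs => cs ++ [f g])) td1
      = td1.modify s [] (fun cs => cs ++ genes.map f) := by
  match genes, hg with
  | g :: gs, _ =>
      rw [List.foldl_cons]
      have hstep : td1.modify s [] (fun cs => cs ++ [f g])
          = td1.insert s (td1.getD s [] ++ [f g]) := rfl
      rw [hstep, pv_foldl_modify_app]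
      show td1.insert s _ = td1.insert s _
      simp

-- under Pre_, every gene row reaches past every sample index
theorem pv_min_rows (dictionary : List (String × List Int)) (list_of_samples : List String)
    (hpre : Pre_translate_dictionary dictionary list_of_samples)
    (hg : PySem.List.sorted (PySem.Dict.ofList dictionary).keys (fun g => g) false ≠ []) :
    list_of_samples.length ≤
      (((PySem.List.sorted (PySem.Dict.ofList dictionary).keys (fun g => g) false).map
          (fun g => (PySem.Dict.ofList dictionary).getD g [])).map List.length).min?.getD 0 := by
  set d := PySem.Dict.ofList dictionary with hd
  set genes := PySem.List.sorted d.keys (fun g => g) false with hgenes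
  have hne : ((genes.map (fun g => d.getD g [])).map List.length) ≠ [] := by
    simpa using hg
  obtain ⟨m, hm⟩ : ∃ m, ((genes.map (fun g => d.getD g [])).map List.length).min? = some m := by
    cases hmm : ((genes.map (fun g => d.getD g [])).map List.length).min? with
    | none => exact absurd (List.min?_eq_none_iff.mp hmm) hne
    | some m => exact ⟨m, rfl⟩
  rw [hm]
  obtain ⟨hmem, -⟩ := List.min?_eq_some_iff.mp hm
  simp only [List.map_map, List.mem_map, Function.comp] at hmem
  obtain ⟨g, hgmem, hlen⟩ := hmem
  have hkeys : g ∈ d.keys := (PySem.List.mem_sorted _ _ _ _).mp hgmem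
  have : ∃ v, (g, v) ∈ d.items := by
    simp only [PySem.Dict.keys, List.mem_map] at hkeys
    obtain ⟨p, hp, hp1⟩ := hkeys
    exact ⟨p.2, by simpa [← hp1] using hp⟩
  obtain ⟨v, hv⟩ := this
  have hgd : d.getD g [] = v :=
    PySem.Dict.getD_of_mem_items d hv (PySem.Dict.nodup_keys_ofList dictionary) []
  have hv2 : list_of_samples.length ≤ v.length := hpre (g, v) hv
  rw [hgd] at hlen
  simp only [Option.getD_some]
  omega

theorem pv_dicts_eq (dictionary : List (String × List Int)) (list_of_samples : List String)
    (hpre : Pre_translate_dictionary dictionary list_of_samples) :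
    (PySem.List.pyRange 0 (list_of_samples.length : Int) 1).foldl
        (fun td i =>
          (PySem.List.sorted (PySem.Dict.ofList dictionary).keys (fun g => g) false).foldl
            (fun td gene_name =>
              td.modify (PySem.List.pyGetD list_of_samples i "") []
                (fun cs => cs ++ [PySem.List.pyGetD ((PySem.Dict.ofList dictionary).getD gene_name []) i 0]))
            (td.setdefault (PySem.List.pyGetD list_of_samples i "") []))
        PySem.Dict.empty
      = (PySem.List.enumerate list_of_samples).foldl
        (fun td p =>
          if (PySem.List.sorted (PySem.Dict.ofList dictionary).keys (fun g => g) false).isEmpty then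
            td.setdefault p.2 []
          else
            (td.setdefault p.2 []).modify p.2 []
              (fun cs => cs ++ PySem.List.pyGetD
                (pvZipStar ((PySem.List.sorted (PySem.Dict.ofList dictionary).keys (fun g => g) false).map
                  (fun g => (PySem.Dict.ofList dictionary).getD g []))) p.1 []))
        PySem.Dict.empty := by
  set d := PySem.Dict.ofList dictionary with hd
  set genes := PySem.List.sorted d.keys (fun g => g) false with hgenes
  set rows := genes.map (fun g => d.getD g []) with hrows
  -- index loop → enumerate loop
  have hrange := pv_foldl_pyRange_eq_enumerate (β := PySem.Dict String (List Int))
    list_of_samples ""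
    (fun td i sname =>
      genes.foldl
        (fun td gene_name =>
          td.modify sname [] (fun cs => cs ++ [PySem.List.pyGetD (d.getD gene_name []) i 0]))
        (td.setdefault sname []))
    0 PySem.Dict.empty
  simp only [sub_zero, zero_add] at hrange
  rw [hrange]
  -- per-sample step: batched extension equals the per-gene appends
  refine PySem.List.foldl_congr_mem _ _ _ _ ?_
  intro td p hp
  have hidx : 0 ≤ p.1 ∧ p.1 < (list_of_samples.length : Int) := by
    have : p.1 ∈ (PySem.List.enumerate list_of_samples 0).map (·.1) :=
      List.mem_map_of_mem hp
    rw [PySem.List.map_fst_enumerate] at this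
    simpa using (PySem.List.mem_pyRange_one).mp (by simpa using this)
  by_cases hg : genes = []
  · simp [hg]
  · rw [if_neg (by simpa [List.isEmpty_iff] using hg)]
    rw [pv_genes_step genes _ _ _ hg]
    have hk : p.1 = ((p.1.toNat : Nat) : Int) := by omega
    have hkm : p.1.toNat < (rows.map List.length).min?.getD 0 := by
      have := pv_min_rows dictionary list_of_samples hpre (by rw [← hd, ← hgenes]; exact hg)
      rw [← hd, ← hgenes, ← hrows] at this
      omega
    congr 1
    funext cs
    congr 1
    rw [hk, pv_zipStar_col rows p.1.toNat hkm, hrows, List.map_map]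
    refine List.map_congr_left ?_
    intro g hgm
    simp only [Function.comp_apply, PySem.List.pyGetD_natCast]

set_option maxRecDepth 8192 in
theorem translate_dictionary_spec : Claim_equal_translate_dictionary := by
  intro dictionary list_of_samples _hdom hpre
  unfold Spec_translate_dictionary
  unfold translate_dictionary translate_dictionary_alt
  exact congrArg PySem.Dict.items (pv_dicts_eq dictionary list_of_samples hpre)
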